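-- pv_equiv track=rewrite | github.com/mathstrains21/Advent-Of-Code | 2015/3.py | execute
-- ===== SOURCE A (Python) =====
-- def execute(puzzle_input):
--     x, y = 0, 0
--     houses = {(x, y)}
--     for move in puzzle_input:
--         if move == "^":
--             x += 1
--         elif move == "v":
--             x -= 1
--         elif move == ">":
--             y += 1
--         elif move == "<":
--             y -= 1
--         houses.add((x, y))
--     return houses
-- ===== SOURCE B (Python) =====
-- def execute(puzzle_input):
--     # Divide and conquer: the visited positions of a move string are the visited
--     # positions of its left half followed by the right half's positions translated
--     # by the left half's endpoint; no running state is threaded through the input.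
--     DELTA = {"^": (1, 0), "v": (-1, 0), ">": (0, 1), "<": (0, -1)}
--
--     def walk(s):
--         # positions after 1..len(s) moves, relative to the start
--         if len(s) <= 1:
--             return [DELTA.get(s[0], (0, 0))] if s else []
--         m = len(s) // 2
--         left, right = walk(s[:m]), walk(s[m:])
--         ex, ey = left[-1]
--         return left + [(ex + dx, ey + dy) for (dx, dy) in right]
--
--     return set([(0, 0)] + walk(puzzle_input))
-- ===== Notes on version B (the rewrite author's own statement) =====
-- stated objective: alternative
-- what changed: Replaces the stateful branching walk (mutate x,y per character and add to the set as you go) with a divide-and-conquer recursion: the visited-position list of a move string is the left half's list followed by the right half's list translated by the left half's endpoint, and the set is collected once at the end; no running position is threaded through the input.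
import Mathlib
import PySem

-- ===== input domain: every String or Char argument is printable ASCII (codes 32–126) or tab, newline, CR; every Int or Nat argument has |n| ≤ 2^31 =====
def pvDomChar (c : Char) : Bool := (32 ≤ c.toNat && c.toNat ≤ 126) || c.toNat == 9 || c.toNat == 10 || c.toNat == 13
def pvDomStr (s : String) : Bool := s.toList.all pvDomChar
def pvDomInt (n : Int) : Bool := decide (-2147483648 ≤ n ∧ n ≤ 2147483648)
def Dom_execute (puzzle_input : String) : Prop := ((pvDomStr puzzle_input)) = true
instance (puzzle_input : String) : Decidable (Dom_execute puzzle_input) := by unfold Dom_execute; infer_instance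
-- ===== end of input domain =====

-- B replaces A's stateful branching walk with divide and conquer: visited positions of a
-- move string = left half's positions ++ right half's positions translated by the left
-- half's endpoint; a structural alternative, not a claimed speedup.

-- ===== PORT A =====
def executeStep (st : (Int × Int) × PySem.Set (Int × Int)) (move : Char) :
    (Int × Int) × PySem.Set (Int × Int) :=
  let x := st.1.1
  let y := st.1.2
  let p : Int × Int :=
    if move = '^' then (x + 1, y)
    else if move = 'v' then (x - 1, y)
    else if move = '>' then (x, y + 1)
    else if move = '<' then (x, y - 1)
    else (x, y)
  (p, PySem.Set.add st.2 p)

def execute (puzzle_input : String) : List (Int × Int) :=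
  (puzzle_input.toList.foldl executeStep
    ((0, 0), PySem.Set.add PySem.Set.empty ((0 : Int), (0 : Int)))).2

-- ===== PORT B =====
-- the DELTA dict of Source B
def deltasB : PySem.Dict Char (Int × Int) :=
  PySem.Dict.ofList [('^', ((1 : Int), (0 : Int))), ('v', (-1, 0)), ('>', (0, 1)), ('<', (0, -1))]

-- termination helpers for walkB (the slices s[:m] / s[m:] with m = len(s)//2 are take/drop)
theorem sliceL_eq (cs : List Char) :
    PySem.List.slice cs none (some (PySem.Int.floordiv (cs.length : Int) 2)) =
      cs.take (cs.length / 2) := by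
  have h2 : PySem.Int.floordiv (cs.length : Int) 2 = ((cs.length / 2 : Nat) : Int) := by
    exact_mod_cast PySem.Int.floordiv_natCast cs.length 2
  rw [h2, PySem.List.slice_to_natCast]

theorem sliceR_eq (cs : List Char) :
    PySem.List.slice cs (some (PySem.Int.floordiv (cs.length : Int) 2)) none =
      cs.drop (cs.length / 2) := by
  have h2 : PySem.Int.floordiv (cs.length : Int) 2 = ((cs.length / 2 : Nat) : Int) := by
    exact_mod_cast PySem.Int.floordiv_natCast cs.length 2
  rw [h2, PySem.List.slice_from_natCast]

-- Source B's walk: positions after 1..len(s) moves relative to the start. The .getD defaults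
-- (for s[0] and left[-1]) are never consulted: s is nonempty in that branch and left has
-- length len(s)//2 ≥ 1 in the else branch.
def walkB (cs : List Char) : List (Int × Int) :=
  if cs.length ≤ 1 then
    if cs.isEmpty then [] else [deltasB.getD ((PySem.List.pyGet? cs 0).getD ' ') (0, 0)]
  else
    let m : Int := PySem.Int.floordiv (cs.length : Int) 2
    let left := walkB (PySem.List.slice cs none (some m))
    let right := walkB (PySem.List.slice cs (some m) none)
    let e := (PySem.List.pyGet? left (-1)).getD (0, 0)
    left ++ right.map (fun d => (e.1 + d.1, e.2 + d.2))
termination_by cs.length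
decreasing_by
  · rw [sliceL_eq]; simp; omega
  · rw [sliceR_eq]; simp; omega

def execute_alt (puzzle_input : String) : List (Int × Int) :=
  PySem.Set.ofList (((0 : Int), (0 : Int)) :: walkB puzzle_input.toList)

-- ===== PRECONDITION & SPEC =====
def Spec_execute (puzzle_input : String) (out : List (Int × Int)) : Prop := out = execute_alt puzzle_input
instance (puzzle_input : String) (out : List (Int × Int)) : Decidable (Spec_execute puzzle_input out) := by unfold Spec_execute; infer_instance

-- ===== CLAIM (what is proved, stated in full; the proofs are below) =====
def Claim_equal_execute : Prop := ∀ (puzzle_input : String), Dom_execute puzzle_input → Spec_execute puzzle_input (execute puzzle_input)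

-- ===== LEMMAS AND PROOFS =====

-- coordinate-pair addition and the per-character delta of A's branch ladder
def padd (a b : Int × Int) : Int × Int := (a.1 + b.1, a.2 + b.2)

def delta (c : Char) : Int × Int :=
  if c = '^' then (1, 0)
  else if c = 'v' then (-1, 0)
  else if c = '>' then (0, 1)
  else if c = '<' then (0, -1)
  else (0, 0)

-- the common reference point: the position after the first k+1 moves
def posAfter (cs : List Char) : Nat → Int × Int :=
  fun k => (cs.take (k + 1)).foldr (fun c q => padd (delta c) q) (0, 0)

def posOf (cs : List Char) : Int × Int :=
  cs.foldr (fun c q => padd (delta c) q) (0, 0)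

theorem padd_zero (a : Int × Int) : padd a (0, 0) = a := by
  simp [padd]

theorem zero_padd (a : Int × Int) : padd (0, 0) a = a := by
  simp [padd]

theorem padd_assoc (a b c : Int × Int) : padd (padd a b) c = padd a (padd b c) := by
  simp [padd]; constructor <;> ring

theorem posOf_nil : posOf [] = (0, 0) := rfl

theorem posOf_cons (c : Char) (l : List Char) :
    posOf (c :: l) = padd (delta c) (posOf l) := rfl

theorem posOf_append (l r : List Char) :
    posOf (l ++ r) = padd (posOf l) (posOf r) := by
  induction l with
  | nil => rw [List.nil_append, posOf_nil, zero_padd]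
  | cons c t ih => rw [List.cons_append, posOf_cons, posOf_cons, ih, padd_assoc]

theorem posAfter_eq (cs : List Char) (k : Nat) :
    posAfter cs k = posOf (cs.take (k + 1)) := rfl

theorem deltasB_getD (c : Char) : deltasB.getD c (0, 0) = delta c := by
  have hitems : deltasB.items =
      [('^', ((1 : Int), (0 : Int))), ('v', (-1, 0)), ('>', (0, 1)), ('<', (0, -1))] := by decide
  unfold delta
  by_cases h1 : c = '^' <;> by_cases h2 : c = 'v' <;> by_cases h3 : c = '>' <;>
    by_cases h4 : c = '<' <;>
    simp_all [PySem.Dict.getD, PySem.Dict.get?, hitems, List.find?] <;>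
    ((repeat' split) <;> (try simp_all [beq_iff_eq]) <;> (try subst_vars) <;> simp_all)

theorem executeStep_eq (p : Int × Int) (s : PySem.Set (Int × Int)) (c : Char) :
    executeStep (p, s) c = (padd p (delta c), PySem.Set.add s (padd p (delta c))) := by
  unfold executeStep delta padd
  by_cases h1 : c = '^' <;> by_cases h2 : c = 'v' <;> by_cases h3 : c = '>' <;>
    by_cases h4 : c = '<' <;> simp_all [sub_eq_add_neg]

-- A's fold, from any start position and set, adds exactly the positions after each prefix.
theorem foldA (cs : List Char) : ∀ (p : Int × Int) (st : PySem.Set (Int × Int)),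
    cs.foldl executeStep (p, st) =
      (padd p (posOf cs),
       ((List.range cs.length).map (fun k => padd p (posAfter cs k))).foldl
         PySem.Set.add st) := by
  induction cs with
  | nil => intro p st; simp [posOf_nil, padd_zero]
  | cons c t ih =>
      intro p st
      rw [List.foldl_cons, executeStep_eq, ih, Prod.mk.injEq]
      constructor
      · rw [posOf_cons, padd_assoc]
      · simp only [List.length_cons, List.range_succ_eq_map, List.map_cons, List.map_map,
          List.foldl_cons]
        congr 1
        · simp [posAfter_eq, posOf_cons, posOf_nil, padd_zero]
        · apply List.map_congr_left
          intro k _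
          simp only [Function.comp]
          rw [posAfter_eq, posAfter_eq, List.take_succ_cons, posOf_cons, ← padd_assoc]

-- B's walk returns exactly the positions after each nonempty prefix.
theorem walk_spec (cs : List Char) :
    walkB cs = (List.range cs.length).map (posAfter cs) := by
  induction cs using walkB.induct with
  | case1 cs hle hemp =>
      rw [walkB, if_pos hle, if_pos hemp]
      simp [List.isEmpty_iff.mp hemp]
  | case2 cs hle hemp =>
      obtain ⟨c, rest, rfl⟩ := List.exists_cons_of_ne_nil (by simpa using hemp)
      have hrest : rest = [] := by
        cases rest with
        | nil => rfl
        | cons _ _ => simp at hle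
      subst hrest
      rw [walkB, if_pos hle, if_neg hemp]
      simp [PySem.List.pyGet?, PySem.List.pyIdx?, deltasB_getD, posAfter_eq, posOf_cons,
        posOf_nil, padd_zero]
  | case3 cs hgt m0 ihl ihr =>
      rw [walkB, if_neg hgt]
      simp only [m0, sliceL_eq, sliceR_eq] at ihl ihr
      simp only [sliceL_eq, sliceR_eq]
      rw [ihl, ihr]
      have hlen : 1 ≤ cs.length / 2 ∧ cs.length / 2 < cs.length := by
        constructor <;> omega
      set m := cs.length / 2 with hm
      -- the endpoint of the left half
      have hleft_len : (cs.take m).length = m := by simp; omega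
      have pyg : ∀ (xs : List (Int × Int)), xs ≠ [] →
          PySem.List.pyGet? xs (-1) = xs[xs.length - 1]? := by
        intro xs h
        have hl : 0 < xs.length := List.length_pos_iff.mpr h
        simp only [PySem.List.pyGet?, PySem.List.pyIdx?]
        rw [if_neg (by omega), if_pos (by omega)]
        norm_num
      have hne : (List.range (cs.take m).length).map (posAfter (cs.take m)) ≠ [] := by
        simp [hleft_len]; omega
      have he : (PySem.List.pyGet?
            ((List.range (cs.take m).length).map (posAfter (cs.take m))) (-1)).getD (0, 0) =
          posOf (cs.take m) := by
        rw [pyg _ hne]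
        simp only [List.length_map, List.length_range, hleft_len]
        rw [List.getElem?_map, List.getElem?_range (by omega)]
        simp only [Option.map_some, Option.getD_some, posAfter_eq]
        rw [List.take_take]
        congr 2
        omega
      rw [he]
      -- split the target range at m
      have hsplit : cs.length = m + (cs.length - m) := by omega
      rw [hsplit, List.range_add, List.map_append, List.map_map]
      congr 1
      · -- left part
        rw [hleft_len]
        apply List.map_congr_left
        intro k hk
        rw [List.mem_range] at hk
        rw [posAfter_eq, posAfter_eq, List.take_take]
        congr 2
        omega
      · -- right part
        rw [List.length_drop]
        simp only [List.map_map]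
        apply List.map_congr_left
        intro k hk
        rw [List.mem_range] at hk
        simp only [Function.comp]
        rw [posAfter_eq, posAfter_eq]
        have harg : m + (k + 1) = m + k + 1 := by omega
        have htake : cs.take (m + k + 1) = cs.take m ++ (cs.drop m).take (k + 1) := by
          rw [← harg, List.take_add]
        rw [htake, posOf_append]
        simp [padd]

-- ===== VERDICT (by name: the statement is the Claim_ definition above) =====
theorem execute_spec : Claim_equal_execute := by
  intro s _
  show execute s = execute_alt s
  unfold execute execute_alt
  rw [foldA, walk_spec, PySem.Set.ofList_eq_foldl, List.foldl_cons]
  simp [zero_padd]
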